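-- pv_equiv track=rewrite | github.com/v3rm1/handwriting_recognition | lineSegmPython3/main.py | connectPaths
-- ===== SOURCE A (Python) =====
-- def connectPaths(totalPaths, paths):
--     for p in paths:
--         connection = False
--         for i in range(0,len(totalPaths)):
--             if totalPaths[i][0] == p[-1]:
--                 totalPaths[i] = p + totalPaths[i]
--                 connection = True
--         if connection == False:
--             totalPaths.append(p)
--     return totalPaths
-- ===== SOURCE B (Python) =====
-- # B: index totalPaths by first element in a dict of index lists; each path is
-- # resolved by one dict lookup instead of a scan over all of totalPaths.
-- # Like A, mutates totalPaths in place and returns it.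
-- def connectPaths(totalPaths, paths):
--     if not paths:
--         return totalPaths
--     heads = {}
--     for i, t in enumerate(totalPaths):
--         heads.setdefault(t[0], []).append(i)
--     for p in paths:
--         idxs = heads.pop(p[-1], None)
--         if idxs is None:
--             heads.setdefault(p[0], []).append(len(totalPaths))
--             totalPaths.append(p)
--         else:
--             for i in idxs:
--                 totalPaths[i] = p + totalPaths[i]
--             heads.setdefault(p[0], []).extend(idxs)
--     return totalPaths
-- ===== Notes on version B (the rewrite author's own statement) =====
-- stated objective: faster
-- what changed: Replaces the per-path linear scan of totalPaths with a dict mapping each head element to the list of indices of totalPaths entries starting with it, so each path is resolved by one lookup and the affected indices are re-keyed on merge.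
-- outside the precondition, e.g. on connectPaths([], [[]]): A returns [[]], B raises IndexError
import Mathlib
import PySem

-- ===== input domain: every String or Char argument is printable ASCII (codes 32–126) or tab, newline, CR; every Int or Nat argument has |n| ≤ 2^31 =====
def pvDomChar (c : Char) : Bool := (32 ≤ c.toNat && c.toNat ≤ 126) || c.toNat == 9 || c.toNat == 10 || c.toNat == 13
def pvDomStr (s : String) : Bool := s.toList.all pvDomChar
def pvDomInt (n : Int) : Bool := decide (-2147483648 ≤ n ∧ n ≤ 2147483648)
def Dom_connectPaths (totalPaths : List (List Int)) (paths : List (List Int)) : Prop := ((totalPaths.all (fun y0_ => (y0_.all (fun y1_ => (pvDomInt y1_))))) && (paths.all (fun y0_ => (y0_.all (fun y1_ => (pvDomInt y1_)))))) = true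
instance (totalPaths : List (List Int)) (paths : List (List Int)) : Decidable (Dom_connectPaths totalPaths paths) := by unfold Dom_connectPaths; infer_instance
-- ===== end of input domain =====

-- B replaces A's per-path scan of totalPaths by a dict from head element to the
-- indices of the entries starting with it (faster: one lookup per path).
-- Python A and B both mutate totalPaths in place; the equivalence proved here is
-- about the RETURN value (B performs the same in-place mutation as A).

-- ===== PORT A =====
-- inner 'for i in range(0, len(totalPaths))' loop; returns (totalPaths, connection)
def connAInner (p : List Int) (tp0 : List (List Int)) : List (List Int) × Bool :=
  (PySem.List.pyRange 0 (tp0.length : Int) 1).foldl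
    (fun st i =>
      if PySem.List.pyGetD (PySem.List.pyGetD st.1 i []) 0 0 = PySem.List.pyGetD p (-1) 0 then
        (PySem.List.pySetD st.1 i (p ++ PySem.List.pyGetD st.1 i []), true)
      else st)
    (tp0, false)

-- body of the outer 'for p in paths' loop
def connAStep (tp : List (List Int)) (p : List Int) : List (List Int) :=
  let st := connAInner p tp
  if st.2 = false then st.1 ++ [p] else st.1

def connectPaths (totalPaths : List (List Int)) (paths : List (List Int)) : List (List Int) :=
  paths.foldl connAStep totalPaths

-- ===== PORT B =====
-- t[0] (with a default; exact inside Pre_, where the indexed list is nonempty)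
def connBKey (t : List Int) : Int := PySem.List.pyGetD t 0 0

-- 'for i, t in enumerate(totalPaths): heads.setdefault(t[0], []).append(i)'
def connBBuild (tp : List (List Int)) : PySem.Dict Int (List Int) :=
  (PySem.List.enumerate tp).foldl
    (fun d it => d.modify (connBKey it.2) [] (· ++ [it.1])) PySem.Dict.empty

-- body of 'for p in paths' in B: pop the bucket of p[-1]; merge, or append
def connBStep (st : List (List Int) × PySem.Dict Int (List Int)) (p : List Int) :
    List (List Int) × PySem.Dict Int (List Int) :=
  match st.2.pop? (PySem.List.pyGetD p (-1) 0) with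
  | none =>
      (st.1 ++ [p], st.2.modify (connBKey p) [] (· ++ [(st.1.length : Int)]))
  | some (idxs, hd2) =>
      (idxs.foldl (fun tp i => PySem.List.pySetD tp i (p ++ PySem.List.pyGetD tp i [])) st.1,
       hd2.modify (connBKey p) [] (· ++ idxs))

def connectPaths_alt (totalPaths : List (List Int)) (paths : List (List Int)) : List (List Int) :=
  if paths = [] then totalPaths
  else (paths.foldl connBStep (totalPaths, connBBuild totalPaths)).1

-- ===== PRECONDITION & SPEC =====
-- Pre_ excludes the inputs with an empty path or (when paths is nonempty) an empty
-- totalPaths entry: there Python A raises IndexError (p[-1] / t[0]) on all of them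
-- except when the scanned list is empty at that moment, so that A never reaches
-- p[-1] and appends the empty path, while B evaluates p[-1] up front and raises.
def Pre_connectPaths (totalPaths : List (List Int)) (paths : List (List Int)) : Prop :=
  (∀ p ∈ paths, p ≠ []) ∧ (paths ≠ [] → ∀ t ∈ totalPaths, t ≠ [])
instance (totalPaths : List (List Int)) (paths : List (List Int)) : Decidable (Pre_connectPaths totalPaths paths) := by unfold Pre_connectPaths; infer_instance

def pvWitness_connectPaths : List (List Int) × List (List Int) :=
  ([[1, 2]], [[3, 1], [4]])

def Spec_connectPaths (totalPaths : List (List Int)) (paths : List (List Int)) (out : List (List Int)) : Prop := out = connectPaths_alt totalPaths paths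
instance (totalPaths : List (List Int)) (paths : List (List Int)) (out : List (List Int)) : Decidable (Spec_connectPaths totalPaths paths out) := by unfold Spec_connectPaths; infer_instance

-- ===== CLAIM (what is proved, stated in full; the proofs are below) =====
def Claim_equal_connectPaths : Prop := ∀ (totalPaths : List (List Int)) (paths : List (List Int)), Dom_connectPaths totalPaths paths → Pre_connectPaths totalPaths paths → Spec_connectPaths totalPaths paths (connectPaths totalPaths paths)

-- ===== LEMMAS AND PROOFS =====

-- the loop invariant tying B's dict to the current totalPaths: every bucket v
-- holds exactly (and without repetition) the indices of the entries whose first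
-- element is v, and stored buckets are nonempty.
def connInv (tp : List (List Int)) (hd : PySem.Dict Int (List Int)) : Prop :=
  (∀ (v i : Int), i ∈ hd.getD v [] ↔
      ∃ n : Nat, i = (n : Int) ∧ n < tp.length ∧ connBKey (tp.getD n []) = v)
  ∧ (∀ (v : Int) (l : List Int), hd.get? v = some l → l ≠ [])
  ∧ (∀ v : Int, (hd.getD v []).Nodup)

theorem dict_get?_erase (d : PySem.Dict Int (List Int)) (k k' : Int) :
    (d.erase k).get? k' = if k' = k then none else d.get? k' := by
  rcases d with ⟨items⟩
  split_ifs with h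
  · subst h
    simp only [PySem.Dict.erase, PySem.Dict.get?, Option.map_eq_none_iff]
    rw [List.find?_eq_none]
    intro x hx
    simp only [List.mem_filter, Bool.not_eq_eq_eq_not, Bool.not_true, beq_eq_false_iff_ne] at hx
    simp [hx.2]
  · induction items with
    | nil => rfl
    | cons a rest ih =>
        simp only [PySem.Dict.erase, PySem.Dict.get?, List.filter_cons] at *
        by_cases h1 : a.1 = k
        · have hk : (!(a.1 == k)) = false := by simp [h1]
          have hk' : (a.1 == k') = false := by simp [h1]; omega
          simp only [hk, Bool.false_eq_true, if_false, List.find?, hk']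
          exact ih
        · have hk : (!(a.1 == k)) = true := by simp [h1]
          by_cases h2 : a.1 = k'
          · simp [List.find?, h2, h]
          · have hb : (a.1 == k') = false := by simp [h2]
            simp only [hk, if_true, List.find?, hb]
            exact ih

theorem dict_getD_erase (d : PySem.Dict Int (List Int)) (k k' : Int) :
    (d.erase k).getD k' [] = if k' = k then [] else d.getD k' [] := by
  rw [PySem.Dict.getD_eq_get?_getD, dict_get?_erase]
  split_ifs <;> simp [PySem.Dict.getD_eq_get?_getD]

theorem connAInner_go (p : List Int) :
    ∀ (suf pre : List (List Int)) (b : Bool),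
    ((PySem.List.pyRange (pre.length : Int) (((pre ++ suf).length : Nat) : Int) 1).foldl
      (fun st i =>
        if PySem.List.pyGetD (PySem.List.pyGetD st.1 i []) 0 0 = PySem.List.pyGetD p (-1) 0 then
          (PySem.List.pySetD st.1 i (p ++ PySem.List.pyGetD st.1 i []), true)
        else st)
      (pre ++ suf, b))
    = (pre ++ suf.map (fun t => if PySem.List.pyGetD t 0 0 = PySem.List.pyGetD p (-1) 0 then p ++ t else t),
       b || suf.any (fun t => decide (PySem.List.pyGetD t 0 0 = PySem.List.pyGetD p (-1) 0))) := by
  intro suf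
  induction suf with
  | nil =>
      intro pre b
      rw [PySem.List.pyRange_one_eq_nil (by simp)]
      simp
  | cons s suf ih =>
      intro pre b
      rw [PySem.List.pyRange_one_cons (by simp)]
      rw [List.foldl_cons]
      have hget : PySem.List.pyGetD (pre ++ s :: suf) ((pre.length : Nat) : Int) ([] : List Int) = s := by
        simp [PySem.List.pyGetD_natCast, List.getD_eq_getElem?_getD]
      have hset : PySem.List.pySetD (pre ++ s :: suf) ((pre.length : Nat) : Int) (p ++ s) = (pre ++ [p ++ s]) ++ suf := by
        rw [PySem.List.pySetD_natCast]
        rw [List.set_append_right _ _ (le_refl _)]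
        simp
      simp only [hget]
      have e1 : (pre ++ s :: suf).length = pre.length + 1 + suf.length := by simp; omega
      rw [e1]
      by_cases hc : PySem.List.pyGetD s 0 0 = PySem.List.pyGetD p (-1) 0
      · rw [if_pos hc, hset]
        have harith : ((pre.length : Int) + 1) = (((pre.length + 1 : Nat)) : Int) := by push_cast; ring
        rw [harith]
        have := ih (pre ++ [p ++ s]) true
        simp only [List.length_append, List.length_cons, List.length_nil, Nat.zero_add] at this
        rw [this]
        simp [hc]
      · rw [if_neg hc]
        have harith : ((pre.length : Int) + 1) = (((pre.length + 1 : Nat)) : Int) := by push_cast; ring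
        rw [harith]
        rw [show pre ++ s :: suf = (pre ++ [s]) ++ suf by simp]
        have := ih (pre ++ [s]) b
        simp only [List.length_append, List.length_cons, List.length_nil, Nat.zero_add] at this
        rw [this]
        simp [hc]

theorem connAInner_eq (p : List Int) (tp : List (List Int)) :
    connAInner p tp =
      (tp.map (fun t => if connBKey t = PySem.List.pyGetD p (-1) 0 then p ++ t else t),
       tp.any (fun t => decide (connBKey t = PySem.List.pyGetD p (-1) 0))) := by
  have := connAInner_go p tp [] false
  simpa [connAInner, connBKey] using this

theorem foldl_pySetD_eq_mapIdx (p : List Int) :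
    ∀ (idxs : List Int) (tp : List (List Int)),
    idxs.Nodup → (∀ i ∈ idxs, ∃ n : Nat, i = (n : Int) ∧ n < tp.length) →
    idxs.foldl (fun tp i => PySem.List.pySetD tp i (p ++ PySem.List.pyGetD tp i [])) tp
      = tp.mapIdx (fun n t => if (n : Int) ∈ idxs then p ++ t else t) := by
  intro idxs
  induction idxs with
  | nil =>
      intro tp _ _
      apply List.ext_getElem (by simp)
      intro m h1 h2
      simp [List.getElem_mapIdx]
  | cons i idxs ih =>
      intro tp hnd hmem
      obtain ⟨n, rfl, hlt⟩ := hmem i (by simp)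
      rw [List.foldl_cons]
      rw [PySem.List.pyGetD_natCast, PySem.List.pySetD_natCast, List.getD_eq_getElem _ _ hlt]
      rw [ih (tp.set n (p ++ tp[n])) hnd.of_cons
          (by intro j hj; obtain ⟨m, rfl, hm⟩ := hmem j (by simp [hj]); exact ⟨m, rfl, by simpa using hm⟩)]
      have hni : ((n : Int)) ∉ idxs := (List.nodup_cons.mp hnd).1
      apply List.ext_getElem (by simp)
      intro m h1 h2
      simp only [List.getElem_mapIdx, List.getElem_set]
      by_cases hm : m = n
      · subst hm
        simp [hni]
      · have hne : ((m : Int)) ≠ ((n : Int)) := by exact_mod_cast hm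
        simp only [List.mem_cons, hne, false_or]
        split_ifs <;> simp_all

theorem key_append (p t : List Int) (hp : p ≠ []) : connBKey (p ++ t) = connBKey p := by
  cases p with
  | nil => exact absurd rfl hp
  | cons a q => simp [connBKey, PySem.List.pyGetD_zero_cons]

theorem build_getD : ∀ (tp : List (List Int)) (s : Int) (d : PySem.Dict Int (List Int)) (v : Int),
    ((PySem.List.enumerate tp s).foldl
        (fun d it => d.modify (connBKey it.2) [] (· ++ [it.1])) d).getD v []
      = d.getD v [] ++ ((PySem.List.enumerate tp s).filter (fun it => connBKey it.2 == v)).map (·.1) := by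
  intro tp
  induction tp with
  | nil => intro s d v; simp [PySem.List.enumerate]
  | cons t tp ih =>
      intro s d v
      rw [PySem.List.enumerate_cons, List.foldl_cons, List.filter_cons]
      by_cases hv : connBKey t = v
      · simp only [hv, beq_self_eq_true, if_true, List.map_cons]
        rw [ih, PySem.Dict.getD_modify_self]
        simp
      · have hb : (connBKey t == v) = false := by simp [hv]
        simp only [hb, Bool.false_eq_true, if_false]
        rw [ih, PySem.Dict.getD_modify_of_ne]
        intro h; exact hv h.symm

theorem mem_build_idx : ∀ (tp : List (List Int)) (s i v : Int),
    (i ∈ ((PySem.List.enumerate tp s).filter (fun it => connBKey it.2 == v)).map (·.1))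
      ↔ ∃ n : Nat, i = s + (n : Int) ∧ n < tp.length ∧ connBKey (tp.getD n []) = v := by
  intro tp
  induction tp with
  | nil => intro s i v; simp [PySem.List.enumerate]
  | cons t tp ih =>
      intro s i v
      rw [PySem.List.enumerate_cons, List.filter_cons]
      by_cases hv : connBKey t = v
      · simp only [hv, beq_self_eq_true, if_true, List.map_cons, List.mem_cons, ih]
        constructor
        · rintro (rfl | ⟨n, rfl, hn, hk⟩)
          · exact ⟨0, by simp, by simp, by simpa using hv⟩
          · exact ⟨n + 1, by push_cast; ring, by simpa using hn, by simpa using hk⟩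
        · rintro ⟨n, rfl, hn, hk⟩
          cases n with
          | zero => left; simp
          | succ m =>
              right
              exact ⟨m, by push_cast; ring, by simp at hn; omega, by simpa using hk⟩
      · have hb : (connBKey t == v) = false := by simp [hv]
        simp only [hb, Bool.false_eq_true, if_false, ih]
        constructor
        · rintro ⟨n, rfl, hn, hk⟩
          exact ⟨n + 1, by push_cast; ring, by simp; omega, by simpa using hk⟩
        · rintro ⟨n, rfl, hn, hk⟩
          cases n with
          | zero => exact absurd (by simpa using hk) hv
          | succ m =>
              exact ⟨m, by push_cast; ring, by simp at hn; omega, by simpa using hk⟩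

theorem nodup_build_idx (tp : List (List Int)) (s v : Int) :
    (((PySem.List.enumerate tp s).filter (fun it => connBKey it.2 == v)).map (·.1)).Nodup := by
  have hsub : (((PySem.List.enumerate tp s).filter (fun it => connBKey it.2 == v)).map (·.1)).Sublist
      (((PySem.List.enumerate tp s)).map (·.1)) := List.Sublist.map _ List.filter_sublist
  apply hsub.nodup
  rw [PySem.List.map_fst_enumerate]
  exact PySem.List.nodup_pyRange_one _ _

theorem inv_build (tp : List (List Int)) : connInv tp (connBBuild tp) := by
  refine ⟨?_, ?_, ?_⟩
  · intro v i
    unfold connBBuild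
    rw [build_getD]
    simp only [PySem.Dict.getD_empty, List.nil_append]
    rw [mem_build_idx]
    constructor
    · rintro ⟨n, rfl, hn, hk⟩; exact ⟨n, by simp, hn, hk⟩
    · rintro ⟨n, rfl, hn, hk⟩; exact ⟨n, by simp, hn, hk⟩
  · intro v l hget
    have hv : v ∈ (connBBuild tp).keys := by
      by_contra hnv
      rw [← PySem.Dict.get?_eq_none_iff_not_mem_keys] at hnv
      simp [hget] at hnv
    have hkeys : (connBBuild tp).keys = PySem.Set.update (PySem.Dict.empty : PySem.Dict Int (List Int)).keys
        ((PySem.List.enumerate tp).map (fun it => connBKey it.2)) := by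
      unfold connBBuild
      exact PySem.Dict.keys_foldl_modify_key _ _ _ _ _
    rw [hkeys] at hv
    have hv' : v ∈ (PySem.List.enumerate tp).map (fun it => connBKey it.2) := by
      simpa [PySem.Set.mem_update, PySem.Dict.keys_empty] using hv
    obtain ⟨it, hit, hkey⟩ := List.mem_map.mp hv'
    have hl : (connBBuild tp).getD v [] = l := by
      simp [PySem.Dict.getD_eq_get?_getD, hget]
    unfold connBBuild at hl
    rw [build_getD] at hl
    simp only [PySem.Dict.getD_empty, List.nil_append] at hl
    intro hlnil
    rw [hlnil] at hl
    have : it.1 ∈ (((PySem.List.enumerate tp 0).filter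
        (fun it => connBKey it.2 == v)).map (·.1)) :=
      List.mem_map_of_mem (List.mem_filter.2 ⟨hit, by simp [hkey]⟩)
    rw [hl] at this
    exact absurd this (List.not_mem_nil)
  · intro v
    unfold connBBuild
    rw [build_getD]
    simp only [PySem.Dict.getD_empty, List.nil_append]
    exact nodup_build_idx tp 0 v

theorem step_eq_and_inv (tp : List (List Int)) (hd : PySem.Dict Int (List Int))
    (p : List Int) (hp : p ≠ []) (hinv : connInv tp hd) :
    connAStep tp p = (connBStep (tp, hd) p).1
      ∧ connInv (connBStep (tp, hd) p).1 (connBStep (tp, hd) p).2 := by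
  obtain ⟨hiff, hne, hnd⟩ := hinv
  set key := PySem.List.pyGetD p (-1) 0 with hkeydef
  set h := connBKey p with hhdef
  have hmapid : (tp.any (fun t => decide (connBKey t = key))) = false →
      tp.map (fun t => if connBKey t = key then p ++ t else t) = tp := by
    intro ha
    have hno : ∀ t ∈ tp, ¬ (connBKey t = key) := by
      intro t ht
      have := List.any_eq_false.mp ha t ht
      simpa using this
    calc tp.map (fun t => if connBKey t = key then p ++ t else t)
        = tp.map id := List.map_congr_left (fun t ht => by simp [hno t ht])
      _ = tp := List.map_id tp
  have hAstep : connAStep tp p =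
      if (tp.any (fun t => decide (connBKey t = key))) = false
      then tp ++ [p]
      else tp.map (fun t => if connBKey t = key then p ++ t else t) := by
    unfold connAStep
    rw [connAInner_eq]
    by_cases ha : (tp.any (fun t => decide (connBKey t = key))) = false
    · rw [if_pos ha, if_pos ha, hmapid ha]
    · rw [if_neg ha, if_neg ha]
  -- index n has head v
  have hany_iff : (tp.any (fun t => decide (connBKey t = key))) = true ↔
      ∃ n : Nat, n < tp.length ∧ connBKey (tp.getD n []) = key := by
    rw [List.any_eq_true]
    constructor
    · rintro ⟨t, ht, hc⟩
      obtain ⟨n, hn, rfl⟩ := List.mem_iff_getElem.mp ht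
      exact ⟨n, hn, by rw [List.getD_eq_getElem _ _ hn]; simpa using hc⟩
    · rintro ⟨n, hn, hc⟩
      refine ⟨tp[n], List.getElem_mem hn, ?_⟩
      rw [List.getD_eq_getElem _ _ hn] at hc
      simpa using hc
  rcases hpop : hd.pop? key with _ | ⟨idxs, hd2⟩
  · -- no bucket: append
    have hget : hd.get? key = none := by
      simpa [PySem.Dict.pop?, Option.map_eq_none_iff] using hpop
    have hbucket : hd.getD key [] = [] := by
      simp [PySem.Dict.getD_eq_get?_getD, hget]
    have hnomatch : ∀ n : Nat, n < tp.length → connBKey (tp.getD n []) ≠ key := by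
      intro n hn hc
      have : ((n : Int)) ∈ hd.getD key [] := (hiff key n).mpr ⟨n, rfl, hn, hc⟩
      rw [hbucket] at this
      exact absurd this (List.not_mem_nil)
    have hanyf : (tp.any (fun t => decide (connBKey t = key))) = false := by
      by_contra hcon
      obtain ⟨n, hn, hc⟩ := hany_iff.mp (by simpa using hcon)
      exact hnomatch n hn hc
    have hB : connBStep (tp, hd) p = (tp ++ [p], hd.modify h [] (· ++ [(tp.length : Int)])) := by
      unfold connBStep
      rw [← hkeydef, hpop]
    refine ⟨by rw [hB]; exact (by rw [hAstep, if_pos hanyf] : connAStep tp p = tp ++ [p]), ?_⟩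
    rw [hB]
    show connInv (tp ++ [p]) (hd.modify h [] (· ++ [(tp.length : Int)]))
    have hplast : (tp ++ [p]).getD tp.length [] = p := by
      simp [List.getD_eq_getElem?_getD]
    refine ⟨?_, ?_, ?_⟩
    · -- hiff for appended state
      intro v i
      rw [PySem.Dict.getD_modify]
      constructor
      · intro hmem
        by_cases hv : v = h
        · rw [if_pos hv] at hmem
          rcases List.mem_append.mp hmem with hmem | hmem
          · obtain ⟨n, rfl, hn, hc⟩ := (hiff h i).mp hmem
            exact ⟨n, rfl, by simp; omega, by rw [List.getD_append _ _ _ _ hn, hc, hv]⟩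
          · have hi : i = ((tp.length : Nat) : Int) := by simpa using hmem
            exact ⟨tp.length, hi, by simp, by rw [hplast, hv]⟩
        · rw [if_neg hv] at hmem
          obtain ⟨n, rfl, hn, hc⟩ := (hiff v i).mp hmem
          exact ⟨n, rfl, by simp; omega, by rw [List.getD_append _ _ _ _ hn]; exact hc⟩
      · rintro ⟨n, rfl, hn, hc⟩
        have hn' : n < tp.length + 1 := by simpa using hn
        by_cases hnl : n < tp.length
        · rw [List.getD_append _ _ _ _ hnl] at hc
          have hmem : ((n : Int)) ∈ hd.getD v [] := (hiff v n).mpr ⟨n, rfl, hnl, hc⟩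
          by_cases hv : v = h
          · rw [if_pos hv]
            exact List.mem_append.mpr (Or.inl (hv ▸ hmem))
          · rw [if_neg hv]
            exact hmem
        · have hn'' : n = tp.length := by omega
          subst hn''
          rw [hplast] at hc
          rw [if_pos (by rw [← hc, hhdef])]
          simp
    · -- hne
      intro v l hgetl
      simp only [PySem.Dict.modify] at hgetl
      rw [PySem.Dict.get?_insert] at hgetl
      split_ifs at hgetl with hv
      · cases hgetl; simp
      · exact hne v l hgetl
    · -- nodup
      intro v
      rw [PySem.Dict.getD_modify]
      split_ifs with hv
      · refine List.Nodup.append (hnd h) (by simp) ?_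
        intro i hi1 hi2
        obtain ⟨n, rfl, hn, _⟩ := (hiff h i).mp hi1
        have : ((n : Int)) = ((tp.length : Nat) : Int) := by simpa using hi2
        omega
      · exact hnd v
  · -- bucket found: merge
    have hget : hd.get? key = some idxs ∧ hd2 = hd.erase key := by
      unfold PySem.Dict.pop? at hpop
      rcases hg : hd.get? key with _ | l
      · rw [hg] at hpop; simp at hpop
      · rw [hg] at hpop; simp at hpop; exact ⟨by rw [hpop.1], hpop.2.symm⟩
    obtain ⟨hget, rfl⟩ := hget
    have hbucket : hd.getD key [] = idxs := by simp [PySem.Dict.getD_eq_get?_getD, hget]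
    have hidxs_ne : idxs ≠ [] := hne key idxs hget
    have hidxs_mem : ∀ i ∈ idxs, ∃ n : Nat, i = (n : Int) ∧ n < tp.length ∧
        connBKey (tp.getD n []) = key := by
      intro i hi
      exact (hiff key i).mp (hbucket ▸ hi)
    have hanyt : (tp.any (fun t => decide (connBKey t = key))) = true := by
      obtain ⟨i, hi⟩ := List.exists_mem_of_ne_nil idxs hidxs_ne
      obtain ⟨n, rfl, hn, hc⟩ := hidxs_mem i hi
      exact hany_iff.mpr ⟨n, hn, hc⟩
    have hB : connBStep (tp, hd) p =
        (idxs.foldl (fun tp i => PySem.List.pySetD tp i (p ++ PySem.List.pyGetD tp i [])) tp,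
         (hd.erase key).modify h [] (· ++ idxs)) := by
      unfold connBStep
      rw [← hkeydef, hpop]
    have hfold : idxs.foldl (fun tp i => PySem.List.pySetD tp i (p ++ PySem.List.pyGetD tp i [])) tp
        = tp.map (fun t => if connBKey t = key then p ++ t else t) := by
      rw [foldl_pySetD_eq_mapIdx p idxs tp (hbucket ▸ hnd key)
        (fun i hi => by obtain ⟨n, rfl, hn, _⟩ := hidxs_mem i hi; exact ⟨n, rfl, hn⟩)]
      apply List.ext_getElem (by simp)
      intro m h1 h2
      simp only [List.getElem_mapIdx, List.getElem_map]
      have hm : m < tp.length := by simpa using h1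
      have hmem_iff : ((m : Int)) ∈ idxs ↔ connBKey (tp.getD m []) = key := by
        rw [← hbucket, hiff key m]
        constructor
        · rintro ⟨n, hn, hlt, hc⟩
          have : m = n := by exact_mod_cast hn
          subst this; exact hc
        · intro hc; exact ⟨m, rfl, hm, hc⟩
      rw [List.getD_eq_getElem _ _ hm] at hmem_iff
      by_cases hc : connBKey tp[m] = key
      · rw [if_pos (hmem_iff.mpr hc), if_pos hc]
      · rw [if_neg (fun hmm => hc (hmem_iff.mp hmm)), if_neg hc]
    set tp' := tp.map (fun t => if connBKey t = key then p ++ t else t) with htp'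
    have hlen' : tp'.length = tp.length := by simp [htp']
    have hKey' : ∀ n : Nat, n < tp.length →
        connBKey (tp'.getD n []) =
          (if connBKey (tp.getD n []) = key then h else connBKey (tp.getD n [])) := by
      intro n hn
      rw [List.getD_eq_getElem _ _ (by omega : n < tp'.length),
          List.getD_eq_getElem _ _ hn]
      simp only [htp', List.getElem_map]
      split_ifs with hc
      · rw [key_append p _ hp]
      · rfl
    refine ⟨?_, ?_⟩
    · rw [hB]
      show connAStep tp p = idxs.foldl _ tp
      rw [hfold, hAstep, hanyt]
      simp
    · rw [hB]
      show connInv (idxs.foldl _ tp) ((hd.erase key).modify h [] (· ++ idxs))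
      rw [hfold]
      refine ⟨?_, ?_, ?_⟩
      · -- hiff
        intro v i
        rw [PySem.Dict.getD_modify]
        constructor
        · intro hmem
          by_cases hv : v = h
          · rw [if_pos hv] at hmem
            rcases List.mem_append.mp hmem with hmem | hmem
            · rw [dict_getD_erase] at hmem
              split_ifs at hmem with hk
              · exact absurd hmem (List.not_mem_nil)
              · obtain ⟨n, rfl, hn, hc⟩ := (hiff h i).mp hmem
                refine ⟨n, rfl, by rw [hlen']; omega, ?_⟩
                rw [hKey' n hn, hc, if_neg hk, hv]
            · obtain ⟨n, rfl, hn, hc⟩ := hidxs_mem i hmem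
              refine ⟨n, rfl, by rw [hlen']; omega, ?_⟩
              rw [hKey' n hn, if_pos hc, hv]
          · rw [if_neg hv] at hmem
            rw [dict_getD_erase] at hmem
            split_ifs at hmem with hk
            · exact absurd hmem (List.not_mem_nil)
            · obtain ⟨n, rfl, hn, hc⟩ := (hiff v i).mp hmem
              refine ⟨n, rfl, by rw [hlen']; omega, ?_⟩
              rw [hKey' n hn, if_neg (fun hcc => hk (by rw [← hc]; exact hcc)), hc]
        · rintro ⟨n, rfl, hn, hc⟩
          rw [hlen'] at hn
          rw [hKey' n hn] at hc
          by_cases hcond : connBKey (tp.getD n []) = key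
          · rw [if_pos hcond] at hc
            rw [if_pos hc.symm]
            apply List.mem_append.mpr
            right
            rw [← hbucket]
            exact (hiff key n).mpr ⟨n, rfl, hn, hcond⟩
          · rw [if_neg hcond] at hc
            have hvk : v ≠ key := fun hvv => hcond (by rw [hc, hvv])
            have hmem : ((n : Int)) ∈ hd.getD v [] := (hiff v n).mpr ⟨n, rfl, hn, hc⟩
            by_cases hv : v = h
            · rw [if_pos hv]
              apply List.mem_append.mpr
              left
              rw [dict_getD_erase, if_neg (by rw [← hv]; exact hvk)]
              rw [← hv]
              exact hmem
            · rw [if_neg hv, dict_getD_erase, if_neg hvk]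
              exact hmem
      · -- hne
        intro v l hgetl
        simp only [PySem.Dict.modify] at hgetl
        rw [PySem.Dict.get?_insert] at hgetl
        split_ifs at hgetl with hv
        · cases hgetl
          intro hz
          exact hidxs_ne (List.append_eq_nil_iff.mp hz).2
        · rw [dict_get?_erase] at hgetl
          split_ifs at hgetl with hk
          exact hne v l hgetl
      · -- nodup
        intro v
        rw [PySem.Dict.getD_modify]
        split_ifs with hv
        · refine List.Nodup.append ?_ (hbucket ▸ hnd key) ?_
          · rw [dict_getD_erase]
            split_ifs
            · simp
            · exact hnd h
          · intro i hi1 hi2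
            rw [dict_getD_erase] at hi1
            split_ifs at hi1 with hk
            · exact absurd hi1 (List.not_mem_nil)
            · obtain ⟨n, hn, hlt, hc⟩ := (hiff h i).mp hi1
              obtain ⟨n', hn', hlt', hc'⟩ := hidxs_mem i hi2
              have : n = n' := by omega
              subst this
              exact hk (hc ▸ hc' ▸ rfl)
        · rw [dict_getD_erase]
          split_ifs
          · simp
          · exact hnd v

theorem conn_main (paths : List (List Int)) :
    ∀ (tp : List (List Int)) (hd : PySem.Dict Int (List Int)),
      connInv tp hd → (∀ p ∈ paths, p ≠ []) →
      paths.foldl connAStep tp = (paths.foldl connBStep (tp, hd)).1 := by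
  induction paths with
  | nil => intro tp hd _ _; rfl
  | cons p ps ih =>
      intro tp hd hinv hne
      have h := step_eq_and_inv tp hd p (hne p (by simp)) hinv
      simp only [List.foldl_cons, h.1]
      have h2 := h.2
      calc (List.foldl connAStep (connBStep (tp, hd) p).1 ps)
          = (List.foldl connBStep ((connBStep (tp, hd) p).1, (connBStep (tp, hd) p).2) ps).1 :=
            ih _ _ h2 (fun q hq => hne q (by simp [hq]))
        _ = (List.foldl connBStep (connBStep (tp, hd) p) ps).1 := rfl

-- ===== VERDICT (by name: the statement is the Claim_ definition above) =====
theorem connectPaths_spec : Claim_equal_connectPaths := by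
  intro tp paths _ hpre
  unfold Spec_connectPaths connectPaths connectPaths_alt
  rcases paths with _ | ⟨p, ps⟩
  · rfl
  · rw [if_neg (by simp)]
    exact conn_main (p :: ps) tp (connBBuild tp) (inv_build tp) hpre.1
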